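-- pv_equiv track=rewrite | github.com/kdotndot/2048ExpectMax | search.py | genScore
-- ===== SOURCE A (Python) =====
-- TABLELEN = 4 #TABLE length and TABLE height
--
-- def genScore(table):
--     score = 0
--     maxnum = 0
--     empty = 0
--     num = 0
--     for x in range(0, TABLELEN):
--         for y in range(0, TABLELEN):
--             if table[y][x] > maxnum:
--                 maxnum = table[y][x]
--             if table[y][x] == 0:
--                 empty += 1
--             num += table[y][x]
--
--     score = maxnum + (2*num) + (3*empty)
--     return score
-- ===== SOURCE B (Python) =====
-- TABLELEN = 4
--
-- def genScore(table):
--     # Recursive decomposition: each cell is mapped to a stats triple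
--     # (max, sum, zero-count), triples are combined with a monoid merge,
--     # rows recursively, then the board recursively over rows.
--     def merge(p, q):
--         return (max(p[0], q[0]), p[1] + q[1], p[2] + q[2])
--
--     def rowstats(row, x):
--         if x == TABLELEN:
--             return (0, 0, 0)
--         v = row[x]
--         return merge((v, v, 1 if v == 0 else 0), rowstats(row, x + 1))
--
--     def boardstats(y):
--         if y == TABLELEN:
--             return (0, 0, 0)
--         return merge(rowstats(table[y], 0), boardstats(y + 1))
--
--     m, s, e = boardstats(0)
--     return m + 2 * s + 3 * e
-- ===== Notes on version B (the rewrite author's own statement) =====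
-- stated objective: alternative
-- what changed: A's fused imperative loop mutating three accumulators is replaced by a recursive divide-and-combine: each cell maps to a (max,sum,zeros) stats triple, a monoid merge combines triples within a row and across rows, and the score is read off the board triple.
import Mathlib
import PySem

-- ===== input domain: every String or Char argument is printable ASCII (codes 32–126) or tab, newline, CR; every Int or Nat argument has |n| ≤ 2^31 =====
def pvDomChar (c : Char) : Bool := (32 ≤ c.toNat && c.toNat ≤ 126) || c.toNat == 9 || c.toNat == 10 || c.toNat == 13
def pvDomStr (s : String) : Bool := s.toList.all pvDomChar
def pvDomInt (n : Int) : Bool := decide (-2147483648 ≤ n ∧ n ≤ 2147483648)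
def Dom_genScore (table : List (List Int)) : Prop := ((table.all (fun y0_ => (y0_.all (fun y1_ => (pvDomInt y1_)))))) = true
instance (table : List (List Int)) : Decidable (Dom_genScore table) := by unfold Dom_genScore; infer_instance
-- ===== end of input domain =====

-- B replaces A's fused mutating loop by a recursive divide-and-combine over
-- (max, sum, zeros) stats triples; equivalence is proved on boards with at
-- least a 4x4 prefix (elsewhere A raises IndexError).

-- ===== PORT A =====
-- literal port of A's loop body: the three accumulator updates for one cell v
def pvStepA (st : Int × Int × Int) (v : Int) : Int × Int × Int :=
  let m := if v > st.1 then v else st.1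
  let e := if v = 0 then st.2.1 + 1 else st.2.1
  (m, e, st.2.2 + v)

-- literal port of A: fused loop over x then y carrying (maxnum, empty, num)
def genScore (table : List (List Int)) : Int :=
  let st :=
    (PySem.List.pyRange 0 4 1).foldl (fun (st : Int × Int × Int) x =>
      (PySem.List.pyRange 0 4 1).foldl (fun (st : Int × Int × Int) y =>
        pvStepA st (PySem.List.pyGetD (PySem.List.pyGetD table y []) x 0)) st)
      ((0 : Int), (0 : Int), (0 : Int))
  st.1 + (2 * st.2.2) + (3 * st.2.1)

-- ===== PORT B =====
-- literal port of B's helpers; recursion index is a Nat. Python tests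
-- `x == TABLELEN`; the guard is written `4 ≤ x` so Lean sees termination —
-- on every call B actually makes (x ≤ 4) the two tests coincide.
def pvMerge (p q : Int × Int × Int) : Int × Int × Int :=
  (max p.1 q.1, p.2.1 + q.2.1, p.2.2 + q.2.2)

def pvRowstats (row : List Int) (x : Nat) : Int × Int × Int :=
  if 4 ≤ x then (0, 0, 0)
  else
    let v := PySem.List.pyGetD row (x : Int) 0
    pvMerge (v, v, if v = 0 then 1 else 0) (pvRowstats row (x + 1))
termination_by 4 - x

def pvBoardstats (table : List (List Int)) (y : Nat) : Int × Int × Int :=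
  if 4 ≤ y then (0, 0, 0)
  else pvMerge (pvRowstats (PySem.List.pyGetD table (y : Int) []) 0)
              (pvBoardstats table (y + 1))
termination_by 4 - y

def genScore_alt (table : List (List Int)) : Int :=
  let st := pvBoardstats table 0
  st.1 + 2 * st.2.1 + 3 * st.2.2

-- ===== PRECONDITION & SPEC =====
-- Pre_ excludes exactly the tables on which A raises IndexError (fewer than 4
-- rows, or one of the first four rows shorter than 4).
def Pre_genScore (table : List (List Int)) : Prop :=
  4 ≤ table.length ∧ ∀ r ∈ table.take 4, 4 ≤ r.length
instance (table : List (List Int)) : Decidable (Pre_genScore table) := by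
  unfold Pre_genScore; infer_instance
def pvWitness_genScore : List (List Int) :=
  [[2, 0, 4, 8], [0, 2, 2, 4], [16, 0, 0, 2], [4, 2, 8, 0]]

def Spec_genScore (table : List (List Int)) (out : Int) : Prop := out = genScore_alt table
instance (table : List (List Int)) (out : Int) : Decidable (Spec_genScore table out) := by
  unfold Spec_genScore; infer_instance

-- ===== CLAIM (what is proved, stated in full; the proofs are below) =====
def Claim_equal_genScore : Prop := ∀ (table : List (List Int)),
  Dom_genScore table → Pre_genScore table → Spec_genScore table (genScore table)

-- ===== LEMMAS AND PROOFS =====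
theorem stepA_eq (st : Int × Int × Int) (v : Int) :
    pvStepA st v = (max st.1 v, st.2.1 + (if v = 0 then (1:Int) else 0), st.2.2 + v) := by
  obtain ⟨m, e, s⟩ := st
  simp only [pvStepA]
  refine Prod.ext ?_ (Prod.ext ?_ rfl) <;> simp only
  · omega
  · split <;> ring

theorem rowstats_eval (v0 v1 v2 v3 : Int) (t : List Int) :
    pvRowstats (v0 :: v1 :: v2 :: v3 :: t) 0 =
      (max v0 (max v1 (max v2 (max v3 0))),
       v0 + (v1 + (v2 + (v3 + 0))),
       (if v0 = 0 then (1:Int) else 0) + ((if v1 = 0 then 1 else 0) +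
         ((if v2 = 0 then 1 else 0) + ((if v3 = 0 then 1 else 0) + 0)))) := by
  rw [pvRowstats, pvRowstats, pvRowstats, pvRowstats, pvRowstats]
  norm_num [pvMerge, PySem.List.pyGetD_ofNat', List.getD]

theorem boardstats_eval (table : List (List Int)) :
    pvBoardstats table 0 =
      pvMerge (pvRowstats (PySem.List.pyGetD table 0 []) 0)
        (pvMerge (pvRowstats (PySem.List.pyGetD table 1 []) 0)
          (pvMerge (pvRowstats (PySem.List.pyGetD table 2 []) 0)
            (pvMerge (pvRowstats (PySem.List.pyGetD table 3 []) 0) (0, 0, 0)))) := by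
  rw [pvBoardstats, pvBoardstats, pvBoardstats, pvBoardstats, pvBoardstats]
  norm_num

-- ===== VERDICT (by name: the statement is the Claim_ definition above) =====
theorem genScore_spec : Claim_equal_genScore := by
  intro table _hdom hpre
  obtain ⟨hlen, hrow⟩ := hpre
  rcases table with _ | ⟨r0, _ | ⟨r1, _ | ⟨r2, _ | ⟨r3, rest⟩⟩⟩⟩ <;> simp at hlen
  have h0 := hrow r0 (by simp)
  have h1 := hrow r1 (by simp)
  have h2 := hrow r2 (by simp)
  have h3 := hrow r3 (by simp)
  rcases r0 with _ | ⟨a0, _ | ⟨a1, _ | ⟨a2, _ | ⟨a3, ta⟩⟩⟩⟩ <;> simp at h0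
  rcases r1 with _ | ⟨b0, _ | ⟨b1, _ | ⟨b2, _ | ⟨b3, tb⟩⟩⟩⟩ <;> simp at h1
  rcases r2 with _ | ⟨c0, _ | ⟨c1, _ | ⟨c2, _ | ⟨c3, tc⟩⟩⟩⟩ <;> simp at h2
  rcases r3 with _ | ⟨d0, _ | ⟨d1, _ | ⟨d2, _ | ⟨d3, td⟩⟩⟩⟩ <;> simp at h3
  show genScore _ = genScore_alt _
  have hr : PySem.List.pyRange 0 4 1 = [0, 1, 2, 3] := by decide
  simp only [genScore, genScore_alt, hr, List.foldl]
  rw [boardstats_eval]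
  simp only [PySem.List.pyGetD_ofNat', List.getD, List.getElem?_cons_zero,
    List.getElem?_cons_succ, Option.getD_some]
  simp only [rowstats_eval, stepA_eq, pvMerge]
  have hm : max (max (max (max (max (max (max (max (max (max (max (max (max (max (max (max (0 : Int) a0) b0) c0) d0) a1) b1) c1) d1) a2) b2) c2) d2) a3) b3) c3) d3 =
      max (max a0 (max a1 (max a2 (max a3 0))))
        (max (max b0 (max b1 (max b2 (max b3 0))))
          (max (max c0 (max c1 (max c2 (max c3 0))))
            (max (max d0 (max d1 (max d2 (max d3 0)))) 0))) := by ac_rfl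
  rw [hm]
  ring
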